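-- pv_equiv track=rewrite | github.com/gabriel-ai-assistant/mikes-bs | openclaw/web/routers/leads.py | _normalize_csv_columns
-- ===== SOURCE A (Python) =====
-- def _normalize_csv_columns(raw: str | None, allowed: dict[str, str], defaults: list[str]) -> list[str]:
--     if not raw:
--         return defaults
--     cols: list[str] = []
--     seen: set[str] = set()
--     for part in raw.split(","):
--         key = part.strip()
--         if key in allowed and key not in seen:
--             cols.append(key)
--             seen.add(key)
--     return cols or defaults
-- ===== SOURCE B (Python) =====
-- def _normalize_csv_columns(raw: str | None, allowed: dict[str, str], defaults: list[str]) -> list[str]: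
--     if not raw:
--         return defaults
--     pending = [p.strip() for p in raw.split(",")]
--     cols: list[str] = []
--     while pending:
--         head, rest = pending[0], pending[1:]
--         if head in allowed:
--             cols.append(head)
--             pending = [k for k in rest if k != head]
--         else:
--             pending = rest
--     return cols or defaults
-- ===== Notes on version B (the rewrite author's own statement) =====
-- stated objective: alternative
-- what changed: Instead of filtering with a seen-set accumulator, B consumes a worklist of stripped keys and deduplicates by deleting all future occurrences of each emitted key from the remaining worklist, so no auxiliary seen structure exists.
import Mathlib
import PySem

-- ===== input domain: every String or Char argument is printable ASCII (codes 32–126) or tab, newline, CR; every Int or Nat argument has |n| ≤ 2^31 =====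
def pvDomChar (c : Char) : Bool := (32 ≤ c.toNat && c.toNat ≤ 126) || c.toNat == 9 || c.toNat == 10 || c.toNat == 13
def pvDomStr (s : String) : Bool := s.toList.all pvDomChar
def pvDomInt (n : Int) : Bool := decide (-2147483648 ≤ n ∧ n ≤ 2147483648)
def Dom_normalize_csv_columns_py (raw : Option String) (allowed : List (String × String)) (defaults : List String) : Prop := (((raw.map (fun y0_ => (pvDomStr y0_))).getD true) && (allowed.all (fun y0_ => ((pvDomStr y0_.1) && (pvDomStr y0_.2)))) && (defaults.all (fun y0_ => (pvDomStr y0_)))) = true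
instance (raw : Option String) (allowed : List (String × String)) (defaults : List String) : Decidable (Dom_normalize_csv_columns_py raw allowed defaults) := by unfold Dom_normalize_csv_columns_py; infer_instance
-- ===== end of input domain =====

-- B replaces A's seen-set filtering loop by a worklist that deletes future
-- occurrences of each emitted key — objective: alternative (same cost class).

-- ===== PORT A =====
def normalize_csv_columns_py (raw : Option String) (allowed : List (String × String)) (defaults : List String) : List String :=
  match raw with
  | none => defaults
  | some s =>
    if s = "" then defaults
    else
      let parts := (PySem.Str.split? s ",").getD []
      let st := parts.foldl (fun (st : List String × PySem.Set String) part =>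
        let key := PySem.Str.strip part
        if PySem.Dict.contains (PySem.Dict.mk allowed) key && !(PySem.Set.contains st.2 key) then
          (st.1 ++ [key], PySem.Set.add st.2 key)
        else st) ([], PySem.Set.empty)
      if st.1 = [] then defaults else st.1

-- ===== PORT B =====
-- the while loop of Source B: consume the worklist head; if allowed, emit it and
-- drop all of its future occurrences from the worklist
def pickKeys (allowed : PySem.Dict String String) : List String → List String
  | [] => []
  | head :: rest =>
    if PySem.Dict.contains allowed head then
      head :: pickKeys allowed (rest.filter (fun k => !(k == head)))
    else
      pickKeys allowed rest
termination_by l => l.length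
decreasing_by
  · have h := List.length_filter_le (fun (x : {x // x ∈ rest}) => !(x.1 == head)) rest.attach
    simp at h ⊢
    omega
  · simp

def normalize_csv_columns_py_alt (raw : Option String) (allowed : List (String × String)) (defaults : List String) : List String :=
  match raw with
  | none => defaults
  | some s =>
    if s = "" then defaults
    else
      let pending := (((PySem.Str.split? s ",").getD []).map PySem.Str.strip)
      let cols := pickKeys (PySem.Dict.mk allowed) pending
      if cols = [] then defaults else cols

-- ===== PRECONDITION & SPEC =====
def Spec_normalize_csv_columns_py (raw : Option String) (allowed : List (String × String)) (defaults : List String) (out : List String) : Prop := out = normalize_csv_columns_py_alt raw allowed defaults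
instance (raw : Option String) (allowed : List (String × String)) (defaults : List String) (out : List String) : Decidable (Spec_normalize_csv_columns_py raw allowed defaults out) := by unfold Spec_normalize_csv_columns_py; infer_instance

-- ===== CLAIM =====
def Claim_equal_normalize_csv_columns_py : Prop := ∀ (raw : Option String) (allowed : List (String × String)) (defaults : List String), Dom_normalize_csv_columns_py raw allowed defaults → Spec_normalize_csv_columns_py raw allowed defaults (normalize_csv_columns_py raw allowed defaults)

-- ===== LEMMAS AND PROOFS =====

-- A's loop, started from any state whose cols list equals its seen set (as lists),
-- ends with the seen set updated by the allowed stripped keys, and cols = seen throughout.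
theorem loopA_eq_update (allowed : List (String × String)) (parts : List String)
    (acc : PySem.Set String) :
    parts.foldl (fun (st : List String × PySem.Set String) part =>
        let key := PySem.Str.strip part
        if PySem.Dict.contains (PySem.Dict.mk allowed) key && !(PySem.Set.contains st.2 key) then
          (st.1 ++ [key], PySem.Set.add st.2 key)
        else st) (acc, acc)
      = (PySem.Set.update acc ((parts.map PySem.Str.strip).filter
            (fun key => PySem.Dict.contains (PySem.Dict.mk allowed) key)),
         PySem.Set.update acc ((parts.map PySem.Str.strip).filter
            (fun key => PySem.Dict.contains (PySem.Dict.mk allowed) key))) := by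
  induction parts generalizing acc with
  | nil => simp [PySem.Set.update]
  | cons p ps ih =>
    simp only [List.foldl_cons, List.map_cons, List.filter_cons]
    by_cases hA : PySem.Dict.contains (PySem.Dict.mk allowed) (PySem.Str.strip p) = true
    · by_cases hS : PySem.Set.contains acc (PySem.Str.strip p) = true
      · have hadd : PySem.Set.add acc (PySem.Str.strip p) = acc := by
          unfold PySem.Set.add; rw [hS]; simp
        rw [if_neg (by rw [hA, hS]; decide), ih acc, if_pos hA]
        simp only [PySem.Set.update, List.foldl_cons, hadd]
      · have hS' : PySem.Set.contains acc (PySem.Str.strip p) = false :=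
          Bool.eq_false_iff.mpr hS
        have hadd : PySem.Set.add acc (PySem.Str.strip p) = acc ++ [PySem.Str.strip p] := by
          unfold PySem.Set.add; rw [hS']; simp
        rw [if_pos (by rw [hA, hS']; decide), hadd, ih (acc ++ [PySem.Str.strip p]), if_pos hA]
        simp only [PySem.Set.update, List.foldl_cons, hadd]
    · have hA' : PySem.Dict.contains (PySem.Dict.mk allowed) (PySem.Str.strip p) = false :=
        Bool.eq_false_iff.mpr hA
      rw [if_neg (by rw [hA']; simp), ih acc, if_neg (by rw [hA']; simp)]

-- updating a set with a list ignores elements already present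
theorem update_filter_of_contains (acc : PySem.Set String) (x : String)
    (hx : PySem.Set.contains acc x = true) (l : List String) :
    PySem.Set.update acc l = PySem.Set.update acc (l.filter (fun y => !(y == x))) := by
  induction l generalizing acc with
  | nil => rfl
  | cons y t ih =>
    by_cases hy : y = x
    · subst hy
      have hadd : PySem.Set.add acc y = acc := by unfold PySem.Set.add; rw [hx]; simp
      simp only [PySem.Set.update, List.foldl_cons, List.filter_cons, hadd,
        beq_self_eq_true, Bool.not_true, if_neg (by simp : ¬ (false = true))]
      exact ih acc hx
    · have hcon : PySem.Set.contains (PySem.Set.add acc y) x = true := by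
        unfold PySem.Set.add
        by_cases h : PySem.Set.contains acc y = true
        · rw [h]; simpa using hx
        · rw [Bool.eq_false_iff.mpr h]
          have hxa : x ∈ acc := by simpa [PySem.Set.contains] using hx
          simp [PySem.Set.contains, hxa]
      simp only [PySem.Set.update, List.filter_cons,
        if_pos (by simp [hy] : (!(y == x)) = true), List.foldl_cons]
      exact ih (PySem.Set.add acc y) hcon

-- the worklist recursion of B computes A's set-update of the allowed keys,
-- for any already-emitted prefix acc disjoint from the worklist
theorem pickKeys_eq_update_fuel (allowed : PySem.Dict String String) :
    ∀ (n : Nat) (keys : List String), keys.length ≤ n →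
    ∀ (acc : PySem.Set String),
    (∀ y ∈ keys, PySem.Set.contains acc y = false) →
    PySem.Set.update acc (keys.filter (fun k => PySem.Dict.contains allowed k))
      = acc ++ pickKeys allowed keys := by
  intro n
  induction n with
  | zero =>
    intro keys hlen acc _
    have : keys = [] := List.eq_nil_of_length_eq_zero (Nat.le_zero.mp hlen)
    subst this
    simp [pickKeys, PySem.Set.update]
  | succ n ih =>
    intro keys hlen acc hdisj
    cases keys with
    | nil => simp [pickKeys, PySem.Set.update]
    | cons head rest =>
      have hrest : rest.length ≤ n := Nat.lt_succ_iff.mp (by simpa using hlen)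
      by_cases hA : PySem.Dict.contains allowed head = true
      · have hS : PySem.Set.contains acc head = false := hdisj head (by simp)
        have hadd : PySem.Set.add acc head = acc ++ [head] := by
          unfold PySem.Set.add; rw [hS]; simp
        rw [pickKeys, if_pos hA]
        simp only [List.filter_cons, if_pos hA, PySem.Set.update, List.foldl_cons, hadd]
        have hcomm : (rest.filter (fun k => PySem.Dict.contains allowed k)).filter
            (fun y => !(y == head))
            = (rest.filter (fun y => !(y == head))).filter
                (fun k => PySem.Dict.contains allowed k) := by
          simp [List.filter_filter, Bool.and_comm]
        have hcon : PySem.Set.contains (acc ++ [head]) head = true := by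
          simp [PySem.Set.contains]
        have hskip := update_filter_of_contains (acc ++ [head]) head hcon
          (rest.filter (fun k => PySem.Dict.contains allowed k))
        simp only [PySem.Set.update] at hskip
        rw [hskip, hcomm]
        have hdisj' : ∀ y ∈ rest.filter (fun y => !(y == head)),
            PySem.Set.contains (acc ++ [head]) y = false := by
          intro y hy
          have hyne : y ≠ head := by simpa using List.of_mem_filter hy
          have hya : y ∉ acc := by
            simpa [PySem.Set.contains] using
              hdisj y (List.mem_cons_of_mem _ (List.mem_of_mem_filter hy))
          simp [PySem.Set.contains, hya, hyne]
        have hlen' : (rest.filter (fun y => !(y == head))).length ≤ n :=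
          le_trans (List.length_filter_le _ _) hrest
        have h2 := ih (rest.filter (fun y => !(y == head))) hlen' (acc ++ [head]) hdisj'
        simp only [PySem.Set.update] at h2
        rw [h2, List.append_assoc]
        rfl
      · rw [pickKeys, if_neg hA]
        simp only [List.filter_cons, if_neg hA]
        exact ih rest hrest acc (fun y hy => hdisj y (List.mem_cons_of_mem _ hy))

theorem pickKeys_eq_update (allowed : PySem.Dict String String)
    (keys : List String) (acc : PySem.Set String)
    (hdisj : ∀ y ∈ keys, PySem.Set.contains acc y = false) :
    PySem.Set.update acc (keys.filter (fun k => PySem.Dict.contains allowed k))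
      = acc ++ pickKeys allowed keys :=
  pickKeys_eq_update_fuel allowed keys.length keys le_rfl acc hdisj

-- ===== VERDICT =====
theorem normalize_csv_columns_py_spec : Claim_equal_normalize_csv_columns_py := by
  intro raw allowed defaults _
  unfold Spec_normalize_csv_columns_py normalize_csv_columns_py normalize_csv_columns_py_alt
  cases raw with
  | none => rfl
  | some s =>
    by_cases hs : s = ""
    · simp [hs]
    · simp only [hs, if_false]
      have h := loopA_eq_update allowed ((PySem.Str.split? s ",").getD []) PySem.Set.empty
      simp only [PySem.Set.empty] at h ⊢
      rw [h]
      have h2 := pickKeys_eq_update (PySem.Dict.mk allowed)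
        ((((PySem.Str.split? s ",").getD []).map PySem.Str.strip)) []
        (fun y _ => rfl)
      simp only [List.nil_append] at h2
      rw [h2]
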